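-- pv_equiv track=rewrite | github.com/vaishnavucv/100-days-of-cybersecurity | x0-automation-script/scanning-tools/SpoofShield/main.py | filter_by_subnet
-- ===== SOURCE A (Python) =====
-- def filter_by_subnet(entries, subnet_prefix):
--     """
--     Filter the parsed ARP entries so we only keep those where the IP starts with SUBNET_PREFIX.
--     Returns a dictionary grouped by interface, e.g.:
--       {
--         'Interface: 192.168.1.10 --- 0x13': [
--             { 'ip': '192.168.1.2', 'mac': '00-50-56-c0-00-08', ... },
--             ...
--         ],
--         ...
--       }
--     """
--     grouped = {}
--     for entry in entries:
--         ip_addr = entry['ip']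
--         if ip_addr.startswith(subnet_prefix):
--             iface = entry['interface']
--             if iface not in grouped:
--                 grouped[iface] = []
--             grouped[iface].append(entry)
--     return grouped
-- ===== SOURCE B (Python) =====
-- def filter_by_subnet(entries, subnet_prefix):
--     # Pipeline: filter once, collect distinct interfaces in first-occurrence
--     # order, then build each group by scanning the filtered list per interface.
--     matched = [e for e in entries if e['ip'].startswith(subnet_prefix)]
--     ifaces = []
--     for e in matched:
--         iface = e['interface']
--         if iface not in ifaces:
--             ifaces.append(iface)
--     return {i: [e for e in matched if e['interface'] == i] for i in ifaces}
-- ===== Notes on version B (the rewrite author's own statement) =====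
-- stated objective: alternative
-- what changed: A builds the grouped dict incrementally in a single pass, appending to per-interface buckets as it goes; B is a filter -> distinct-keys -> per-key rescan pipeline that materializes the matched list once and constructs each group with its own scan.
import Mathlib
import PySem

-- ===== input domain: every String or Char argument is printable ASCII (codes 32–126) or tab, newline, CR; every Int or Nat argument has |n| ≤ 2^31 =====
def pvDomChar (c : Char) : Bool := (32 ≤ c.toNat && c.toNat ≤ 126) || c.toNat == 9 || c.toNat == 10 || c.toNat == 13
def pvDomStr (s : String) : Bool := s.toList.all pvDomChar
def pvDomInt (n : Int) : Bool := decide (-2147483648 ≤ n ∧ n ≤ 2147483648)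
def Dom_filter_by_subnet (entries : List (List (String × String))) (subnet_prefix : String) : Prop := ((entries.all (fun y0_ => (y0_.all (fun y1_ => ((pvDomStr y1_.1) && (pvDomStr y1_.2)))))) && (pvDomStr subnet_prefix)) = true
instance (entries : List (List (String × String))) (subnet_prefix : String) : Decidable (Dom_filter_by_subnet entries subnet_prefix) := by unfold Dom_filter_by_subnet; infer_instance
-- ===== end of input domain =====

-- B replaces A's one-pass incremental grouping by a filter → distinct-keys → per-key rescan
-- pipeline (objective: alternative decomposition; same return value).

-- ===== PORT A =====
-- dict lookup entry[k] (first match); Pre_ guarantees the key is present wherever A evaluates it,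
-- so the "" default is never observed on admitted inputs (Python raises KeyError there).
def pvGetD (e : List (String × String)) (k : String) : String :=
  match e.find? (fun p => p.1 == k) with
  | some p => p.2
  | none => ""

-- grouped[iface].append(entry): append e to the (unique) bucket keyed iface
def fbsModify : List (String × List (List (String × String))) → String → List (String × String) → List (String × List (List (String × String)))
  | [], _, _ => []
  | (k, v) :: t, iface, e => if k == iface then (k, v ++ [e]) :: t else (k, v) :: fbsModify t iface e

def filter_by_subnet (entries : List (List (String × String))) (subnet_prefix : String) : List (String × List (List (String × String))) :=
  entries.foldl (fun grouped entry =>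
    let ip_addr := pvGetD entry "ip"
    if PySem.Str.startswith ip_addr subnet_prefix then
      let iface := pvGetD entry "interface"
      if grouped.any (fun p => p.1 == iface) then fbsModify grouped iface entry
      else grouped ++ [(iface, [entry])]
    else grouped) []

-- ===== PORT B =====
def filter_by_subnet_alt (entries : List (List (String × String))) (subnet_prefix : String) : List (String × List (List (String × String))) :=
  let matched := entries.filter (fun e => PySem.Str.startswith (pvGetD e "ip") subnet_prefix)
  let ifaces := matched.foldl (fun acc e =>
    let iface := pvGetD e "interface"
    if acc.contains iface then acc else acc ++ [iface]) []
  ifaces.map (fun i => (i, matched.filter (fun e => pvGetD e "interface" == i)))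

-- ===== PRECONDITION & SPEC =====
-- Pre_ excludes exactly the inputs on which Python A raises KeyError: an entry without an
-- 'ip' key, or a matched entry without an 'interface' key (B raises there too).
def Pre_filter_by_subnet (entries : List (List (String × String))) (subnet_prefix : String) : Prop :=
  (entries.all (fun e =>
    e.any (fun p => p.1 == "ip") &&
    (!PySem.Str.startswith (pvGetD e "ip") subnet_prefix || e.any (fun p => p.1 == "interface")))) = true
instance (entries : List (List (String × String))) (subnet_prefix : String) : Decidable (Pre_filter_by_subnet entries subnet_prefix) := by unfold Pre_filter_by_subnet; infer_instance

def pvWitness_filter_by_subnet : (List (List (String × String))) × String :=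
  ([[("ip", "10.0.0.2"), ("interface", "eth0")], [("ip", "8.8.8.8"), ("interface", "eth1")]], "10.")

def Spec_filter_by_subnet (entries : List (List (String × String))) (subnet_prefix : String) (out : List (String × List (List (String × String)))) : Prop := out = filter_by_subnet_alt entries subnet_prefix
instance (entries : List (List (String × String))) (subnet_prefix : String) (out : List (String × List (List (String × String)))) : Decidable (Spec_filter_by_subnet entries subnet_prefix out) := by unfold Spec_filter_by_subnet; infer_instance

-- ===== CLAIM (what is proved, stated in full; the proofs are below) =====
def Claim_equal_filter_by_subnet : Prop := ∀ (entries : List (List (String × String))) (subnet_prefix : String), Dom_filter_by_subnet entries subnet_prefix → Pre_filter_by_subnet entries subnet_prefix → Spec_filter_by_subnet entries subnet_prefix (filter_by_subnet entries subnet_prefix)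

-- ===== LEMMAS AND PROOFS =====

-- interface key of an entry
def fbsIfc (e : List (String × String)) : String := pvGetD e "interface"

-- first-occurrence list of a list of strings
def fbsFo : List String → List String
  | [] => []
  | x :: xs => x :: fbsFo (xs.filter (fun y => !(y == x)))
termination_by l => l.length
decreasing_by simpa using le_trans (List.length_filter_le _ _) (by simp)

lemma fbsFo_nil : fbsFo [] = [] := by rw [fbsFo]

lemma fbsFo_cons (x : String) (xs : List String) :
    fbsFo (x :: xs) = x :: fbsFo (xs.filter (fun y => !(y == x))) := by rw [fbsFo]

lemma fbsFo_subset_aux : ∀ (n : ℕ) (xs : List String), xs.length ≤ n → ∀ y ∈ fbsFo xs, y ∈ xs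
  | _, [] => by simp [fbsFo_nil]
  | 0, x :: xs => by intro h; simp at h
  | Nat.succ n, x :: xs => by
      intro h y hy
      rw [fbsFo_cons] at hy
      rcases List.mem_cons.mp hy with hy | hy
      · simp [hy]
      · have hlen : (xs.filter (fun y => !(y == x))).length ≤ n :=
          le_trans (List.length_filter_le _ _) (Nat.succ_le_succ_iff.mp (by simpa using h))
        exact List.mem_cons_of_mem _
          (List.mem_of_mem_filter (fbsFo_subset_aux n _ hlen y hy))

lemma fbsFo_subset (xs : List String) : ∀ y ∈ fbsFo xs, y ∈ xs :=
  fbsFo_subset_aux xs.length xs le_rfl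

lemma fbsDistinct_eq (xs : List String) (acc : List String) :
    xs.foldl (fun a x => if a.contains x then a else a ++ [x]) acc
      = acc ++ fbsFo (xs.filter (fun x => !acc.contains x)) := by
  induction xs generalizing acc with
  | nil => simp [fbsFo_nil]
  | cons x xs ih =>
      rw [List.foldl_cons]
      by_cases h : x ∈ acc
      · rw [if_pos (by simpa [List.contains_eq_mem] using h), ih, List.filter_cons]
        simp [h]
      · rw [if_neg (by simpa [List.contains_eq_mem] using h), ih, List.filter_cons]
        have hx : (!acc.contains x) = true := by simp [List.contains_eq_mem, h]
        rw [hx, if_pos rfl, fbsFo_cons, List.filter_filter]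
        have hfil : List.filter (fun y => !(acc ++ [x]).contains y) xs
            = List.filter (fun a => (!(a == x)) && !acc.contains a) xs := by
          refine List.filter_congr ?_
          intro y _
          by_cases h1 : y ∈ acc <;> by_cases h2 : y = x <;>
            simp [List.contains_eq_mem, h1, h2]
        rw [hfil, List.append_assoc, List.singleton_append]

lemma fbsModify_keys (g : List (String × List (List (String × String)))) (i : String) (e : List (String × String)) :
    (fbsModify g i e).map Prod.fst = g.map Prod.fst := by
  induction g with
  | nil => rfl
  | cons p t ih =>
      obtain ⟨k, v⟩ := p
      by_cases h : k == i <;> simp [fbsModify, h, ih]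

lemma fbsModify_any (g : List (String × List (List (String × String)))) (i j : String) (e : List (String × String)) :
    (fbsModify g i e).any (fun p => p.1 == j) = g.any (fun p => p.1 == j) := by
  have h1 : ∀ (l : List (String × List (List (String × String)))),
      l.any (fun p => p.1 == j) = (l.map Prod.fst).any (fun k => k == j) := by
    intro l; rw [List.any_map]; rfl
  rw [h1, h1, fbsModify_keys]

-- fbsModify on a nodup-keyed assoc list containing key i appends e to that bucket only
lemma fbsModify_map (acc : List (String × List (List (String × String))))
    (hnd : (acc.map Prod.fst).Nodup) (e : List (String × String)) (ms : List (List (String × String)))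
    (hk : acc.any (fun p => p.1 == fbsIfc e) = true) :
    (fbsModify acc (fbsIfc e) e).map (fun p => (p.1, p.2 ++ ms.filter (fun x => fbsIfc x == p.1)))
      = acc.map (fun p => (p.1, p.2 ++ (e :: ms).filter (fun x => fbsIfc x == p.1))) := by
  induction acc with
  | nil => simp at hk
  | cons p t ih =>
      obtain ⟨k, v⟩ := p
      by_cases h : (k == fbsIfc e) = true
      · have hke : k = fbsIfc e := by simpa using h
        simp only [fbsModify, if_pos h, List.map_cons, List.filter_cons]
        congr 1
        · simp [hke, List.append_assoc]
        · apply List.map_congr_left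
          intro q hq
          have hq1 : q.1 ≠ fbsIfc e := by
            intro hqe
            have : k ∈ t.map Prod.fst := by
              rw [hke, ← hqe]; exact List.mem_map_of_mem hq
            exact (List.nodup_cons.mp hnd).1 this
          have hb : (fbsIfc e == q.1) = false := by
            simpa using fun hh => hq1 hh.symm
          simp [hb]
      · simp only [fbsModify, if_neg h, List.map_cons]
        congr 1
        · have hb : (fbsIfc e == k) = false := by
            simpa using fun hh => (by simpa using h : ¬ k = fbsIfc e) hh.symm
          simp [hb]
        · exact ih (List.nodup_cons.mp hnd).2 (by simpa [h] using hk)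

-- the grouping fold, on the already-filtered list
lemma fbsGroup_eq (ms : List (List (String × String)))
    (acc : List (String × List (List (String × String))))
    (hnd : (acc.map Prod.fst).Nodup) :
    ms.foldl (fun g e =>
        if g.any (fun p => p.1 == fbsIfc e) then fbsModify g (fbsIfc e) e
        else g ++ [(fbsIfc e, [e])]) acc
      = acc.map (fun p => (p.1, p.2 ++ ms.filter (fun e => fbsIfc e == p.1)))
        ++ (fbsFo ((ms.map fbsIfc).filter (fun i => !acc.any (fun p => p.1 == i)))).map
            (fun i => (i, ms.filter (fun e => fbsIfc e == i))) := by
  induction ms generalizing acc with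
  | nil => simp [fbsFo_nil]
  | cons e ms ih =>
      rw [List.foldl_cons]
      by_cases h : acc.any (fun p => p.1 == fbsIfc e) = true
      · rw [if_pos h, ih (fbsModify acc (fbsIfc e) e) (by rw [fbsModify_keys]; exact hnd)]
        congr 1
        · exact fbsModify_map acc hnd e ms h
        · -- e's interface is already a key: it is dropped from the new-keys list
          have harg : (ms.map fbsIfc).filter (fun i => !(fbsModify acc (fbsIfc e) e).any (fun p => p.1 == i))
              = ((e :: ms).map fbsIfc).filter (fun i => !acc.any (fun p => p.1 == i)) := by
            rw [List.map_cons, List.filter_cons]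
            simp only [h, Bool.not_true, Bool.false_eq_true, if_false]
            exact List.filter_congr (by intro i _; rw [fbsModify_any])
          rw [harg]
          apply List.map_congr_left
          intro i hi
          have hif : i ∈ ((e :: ms).map fbsIfc).filter (fun i => !acc.any (fun p => p.1 == i)) :=
            fbsFo_subset _ i hi
          have hpred := List.of_mem_filter hif
          have hne : (fbsIfc e == i) = false := by
            by_contra hb
            have : fbsIfc e = i := by
              cases hb2 : (fbsIfc e == i) <;> simp_all
            rw [← this] at hpred
            simp [h] at hpred
          simp [hne]
      · rw [if_neg h]
        have h' : acc.any (fun p => p.1 == fbsIfc e) = false := Bool.eq_false_iff.mpr h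
        have hnd' : ((acc ++ [(fbsIfc e, [e])]).map Prod.fst).Nodup := by
          rw [List.map_append]
          simp only [List.map_cons, List.map_nil]
          rw [List.nodup_append]
          refine ⟨hnd, List.nodup_singleton _, ?_⟩
          intro k hk j hj
          have hj' : j = fbsIfc e := by simpa using hj
          subst hj'
          obtain ⟨p, hp, hp1⟩ := List.mem_map.mp hk
          intro hkj
          exact (fun hb => List.any_eq_false.mp h' p hp hb) (by simp [hp1, hkj])
        rw [ih _ hnd']
        -- right-hand side: new key fbsIfc e is appended
        have hRfo : ((e :: ms).map fbsIfc).filter (fun i => !acc.any (fun p => p.1 == i))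
            = fbsIfc e :: (ms.map fbsIfc).filter (fun i => !acc.any (fun p => p.1 == i)) := by
          rw [List.map_cons, List.filter_cons]
          simp [h']
        rw [hRfo, fbsFo_cons]
        have hLfo : (ms.map fbsIfc).filter (fun i => !(acc ++ [(fbsIfc e, [e])]).any (fun p => p.1 == i))
            = ((ms.map fbsIfc).filter (fun i => !acc.any (fun p => p.1 == i))).filter
                (fun y => !(y == fbsIfc e)) := by
          rw [List.filter_filter]
          refine List.filter_congr ?_
          intro i _
          rw [List.any_append]
          simp only [List.any_cons, List.any_nil, Bool.or_false, Bool.not_or]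
          rw [Bool.and_comm]
          congr 1
          cases hb : (i == fbsIfc e) <;> cases hb2 : (fbsIfc e == i) <;> simp_all
        rw [hLfo]
        rw [List.map_append, List.map_cons]
        have hacc : acc.map (fun p => (p.1, p.2 ++ ms.filter (fun x => fbsIfc x == p.1)))
            = acc.map (fun p => (p.1, p.2 ++ (e :: ms).filter (fun x => fbsIfc x == p.1))) := by
          apply List.map_congr_left
          intro p hp
          have hb : (p.1 == fbsIfc e) = false := by
            simpa using List.any_eq_false.mp h' p hp
          have hb2 : (fbsIfc e == p.1) = false := by
            cases hb3 : (fbsIfc e == p.1) <;> simp_all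
          rw [List.filter_cons, hb2]
          simp
        have htail : ∀ i ∈ fbsFo (((ms.map fbsIfc).filter (fun i => !acc.any (fun p => p.1 == i))).filter
              (fun y => !(y == fbsIfc e))),
            (fun i => (i, ms.filter (fun x => fbsIfc x == i))) i
              = (fun i => (i, (e :: ms).filter (fun x => fbsIfc x == i))) i := by
          intro i hi
          have hmem := fbsFo_subset _ i hi
          have := List.of_mem_filter hmem
          have hne : (fbsIfc e == i) = false := by
            cases hb : (fbsIfc e == i) <;> simp_all
          simp [hne]
        rw [List.map_congr_left htail, hacc]
        simp [List.filter_cons]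

-- ===== VERDICT (by name: the statement is the Claim_ definition above) =====
theorem filter_by_subnet_spec : Claim_equal_filter_by_subnet := by
  intro entries pfx _ _
  unfold Spec_filter_by_subnet filter_by_subnet filter_by_subnet_alt
  simp only []
  rw [PySem.List.foldl_if_eq_foldl_filter (p := fun e => PySem.Str.startswith (pvGetD e "ip") pfx)]
  set ms := entries.filter (fun e => PySem.Str.startswith (pvGetD e "ip") pfx) with hms
  have hA := fbsGroup_eq ms [] (by simp)
  simp only [fbsIfc] at hA
  rw [hA]
  have hB : ms.foldl (fun acc e =>
        if acc.contains (pvGetD e "interface") then acc else acc ++ [pvGetD e "interface"]) []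
      = fbsFo (ms.map fbsIfc) := by
    have hd := fbsDistinct_eq (ms.map fbsIfc) []
    rw [List.foldl_map] at hd
    simpa [fbsIfc] using hd
  rw [hB]
  simp
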